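-- pv_equiv track=rewrite | github.com/victoryang126/TestFramework-master | 0701Report/Util.py | _split_explanation
-- ===== SOURCE A (Python) =====
-- from typing import List
--
-- def _split_explanation(explanation: str) -> List[str]:
--     r"""Return a list of individual lines in the explanation.
--
--     This will return a list of lines split on '\n{', '\n}' and '\n~'.
--     Any other newlines will be escaped and appear in the line as the
--     literal '\n' characters.
--     """
--     raw_lines = (explanation or "").split("\n")
--     lines = [raw_lines[0]]
--     for values in raw_lines[1:]:
--         if values and values[0] in ["{", "}", "~", ">"]:
--             lines.append(values)
--         else:
--             lines[-1] += "\\n" + values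
--     return lines
-- ===== SOURCE B (Python) =====
-- def _split_explanation(explanation):
--     # One forward pass: escape every newline whose following character is not a
--     # special prefix, then split on the surviving real newlines.
--     s = explanation or ""
--     pieces = []
--     for c, nxt in zip(s, list(s[1:]) + [None]):
--         if c == "\n" and nxt not in ("{", "}", "~", ">"):
--             pieces.append("\\n")
--         else:
--             pieces.append(c)
--     return "".join(pieces).split("\n")
-- ===== Notes on version B (the rewrite author's own statement) =====
-- stated objective: alternative
-- what changed: B replaces A's split-then-recombine loop (mutating the last line) with a single forward escape pass over characters with one-char lookahead followed by one split on the surviving newlines.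
import Mathlib
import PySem

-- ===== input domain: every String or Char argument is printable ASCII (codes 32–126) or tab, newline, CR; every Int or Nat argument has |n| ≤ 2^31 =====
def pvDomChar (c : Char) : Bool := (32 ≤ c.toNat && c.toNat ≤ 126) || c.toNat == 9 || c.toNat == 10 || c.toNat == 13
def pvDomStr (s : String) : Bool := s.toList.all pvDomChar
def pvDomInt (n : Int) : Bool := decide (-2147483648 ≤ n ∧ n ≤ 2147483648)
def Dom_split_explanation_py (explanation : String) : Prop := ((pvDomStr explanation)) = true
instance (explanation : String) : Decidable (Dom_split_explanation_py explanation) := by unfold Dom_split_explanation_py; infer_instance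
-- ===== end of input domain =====

-- B computes the same lines by escaping non-special newlines in one lookahead pass and
-- splitting once, instead of A's split-then-recombine fold; objective: alternative.


-- ===== PORT A =====
-- Lines are modelled as List Char (String.ofList applied once at the end); 'explanation or ""'
-- is the identity on str inputs.  raw_lines[0] is total (split is never empty): headD.
def stepA (lines : List (List Char)) (values : List Char) : List (List Char) :=
  if values ≠ [] ∧ values.head? ∈ [some '{', some '}', some '~', some '>'] then
    lines ++ [values]                                       -- lines.append(values)
  else
    lines.dropLast ++ [lines.getLastD [] ++ '\\' :: 'n' :: values]  -- lines[-1] += "\\n" + values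

def split_explanation_py (explanation : String) : List String :=
  let raw_lines := PySem.Chars.splitOn explanation.toList ['\n']
  let lines := [raw_lines.headD []]
  ((PySem.List.slice raw_lines (some 1) none).foldl stepA lines).map String.ofList

-- ===== PORT B =====
-- zip(s, list(s[1:]) + [None]): each char with its successor (none at the end).
def stepB (acc : List (List Char)) (p : Char × Option Char) : List (List Char) :=
  if p.1 = '\n' ∧ ¬ p.2 ∈ [some '{', some '}', some '~', some '>'] then
    acc ++ [['\\', 'n']]
  else
    acc ++ [[p.1]]

def split_explanation_py_alt (explanation : String) : List String :=
  let s := explanation.toList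
  let pieces := (s.zip ((s.drop 1).map some ++ [none])).foldl stepB []
  (PySem.Chars.splitOn pieces.flatten ['\n']).map String.ofList   -- "".join(pieces).split("\n")

-- ===== PRECONDITION & SPEC =====
def Spec_split_explanation_py (explanation : String) (out : List String) : Prop := out = split_explanation_py_alt explanation
instance (explanation : String) (out : List String) : Decidable (Spec_split_explanation_py explanation out) := by unfold Spec_split_explanation_py; infer_instance

-- ===== CLAIM (what is proved, stated in full; the proofs are below) =====
def Claim_equal_split_explanation_py : Prop := ∀ (explanation : String), Dom_split_explanation_py explanation → Spec_split_explanation_py explanation (split_explanation_py explanation)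

-- ===== LEMMAS AND PROOFS =====

-- Structural single-char splitter: sp2 s = (first group, remaining groups).
def sp2 : List Char → List Char × List (List Char)
  | [] => ([], [])
  | c :: cs =>
    let r := sp2 cs
    if c = '\n' then ([], r.1 :: r.2) else (c :: r.1, r.2)

-- The escape pass, structurally (what B's zip-fold flattens to).
def escChars : List Char → List Char
  | [] => []
  | c :: rest =>
    if c = '\n' ∧ ¬ rest.head? ∈ [some '{', some '}', some '~', some '>'] then
      '\\' :: 'n' :: escChars rest
    else c :: escChars rest

-- A's merge, structurally.
def mergeA (cur : List Char) : List (List Char) → List (List Char)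
  | [] => [cur]
  | v :: vs =>
    if v ≠ [] ∧ v.head? ∈ [some '{', some '}', some '~', some '>'] then
      cur :: mergeA v vs
    else mergeA (cur ++ '\\' :: 'n' :: v) vs

theorem sp2_cons_nl (cs : List Char) : sp2 ('\n' :: cs) = ([], (sp2 cs).1 :: (sp2 cs).2) := by
  simp [sp2]

theorem sp2_cons_ne (c : Char) (cs : List Char) (h : ¬ c = '\n') :
    sp2 (c :: cs) = (c :: (sp2 cs).1, (sp2 cs).2) := by
  simp [sp2, h]

theorem mergeA_cons (cur v : List Char) (vs : List (List Char)) :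
    mergeA cur (v :: vs) =
      if v ≠ [] ∧ v.head? ∈ [some '{', some '}', some '~', some '>'] then cur :: mergeA v vs
      else mergeA (cur ++ '\\' :: 'n' :: v) vs := rfl

theorem splitOn_go_single (fuel : Nat) :
    ∀ (l cur : List Char) (accs : List (List Char)), l.length ≤ fuel →
      PySem.Chars.splitOn.go ['\n'] fuel l cur accs =
        accs.reverse ++ (cur.reverse ++ (sp2 l).1) :: (sp2 l).2 := by
  induction fuel with
  | zero =>
    intro l cur accs h
    have hl : l = [] := List.eq_nil_of_length_eq_zero (Nat.le_zero.mp h)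
    subst hl
    simp [PySem.Chars.splitOn.go, sp2]
  | succ fuel ih =>
    intro l cur accs h
    cases l with
    | nil => simp [PySem.Chars.splitOn.go, sp2]
    | cons c rest =>
      by_cases hc : c = '\n'
      · subst hc
        simp only [PySem.Chars.splitOn.go, sp2, List.isPrefixOf, BEq.rfl, Bool.true_and,
          if_pos, List.length_cons, List.length_nil, List.drop_succ_cons, List.drop_zero]
        rw [ih rest [] (cur.reverse :: accs) (Nat.le_of_succ_le_succ h)]
        simp
      · have hpre : List.isPrefixOf ['\n'] (c :: rest) = false := by
          simp only [List.isPrefixOf, Bool.and_true, beq_eq_false_iff_ne, ne_eq]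
          exact fun hcc => hc hcc.symm
        simp only [PySem.Chars.splitOn.go, hpre, Bool.false_eq_true, if_false]
        rw [ih rest (c :: cur) accs (Nat.le_of_succ_le_succ h)]
        simp [sp2, hc]

theorem splitOn_single (s : List Char) :
    PySem.Chars.splitOn s ['\n'] = (sp2 s).1 :: (sp2 s).2 := by
  unfold PySem.Chars.splitOn
  rw [splitOn_go_single (s.length + 1) s [] [] (Nat.le_succ _)]
  simp

theorem foldl_stepA (gs : List (List Char)) :
    ∀ (pre : List (List Char)) (cur : List Char),
      gs.foldl stepA (pre ++ [cur]) = pre ++ mergeA cur gs := by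
  induction gs with
  | nil => intro pre cur; simp [mergeA]
  | cons v vs ih =>
    intro pre cur
    simp only [List.foldl_cons, mergeA, stepA]
    by_cases h : v ≠ [] ∧ v.head? ∈ [some '{', some '}', some '~', some '>']
    · simp only [if_pos h]
      have := ih (pre ++ [cur]) v
      rw [this, List.append_assoc]
      rfl
    · simp only [if_neg h, List.dropLast_concat, List.getLastD_concat]
      exact ih pre (cur ++ '\\' :: 'n' :: v)

theorem head_sp2_spec (cs : List Char) :
    ((sp2 cs).1 ≠ [] ∧ (sp2 cs).1.head? ∈ [some '{', some '}', some '~', some '>']) ↔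
      cs.head? ∈ [some '{', some '}', some '~', some '>'] := by
  cases cs with
  | nil => simp [sp2]
  | cons c cs =>
    by_cases hc : c = '\n'
    · subst hc; simp [sp2]
    · simp [sp2, hc]

theorem mergeA_escChars (s : List Char) :
    ∀ (pre : List Char),
      mergeA (pre ++ (sp2 s).1) (sp2 s).2 =
        (pre ++ (sp2 (escChars s)).1) :: (sp2 (escChars s)).2 := by
  induction s with
  | nil => intro pre; simp [sp2, escChars, mergeA]
  | cons c cs ih =>
    intro pre
    by_cases hc : c = '\n'
    · subst hc
      by_cases hs : cs.head? ∈ [some '{', some '}', some '~', some '>']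
      · have hsp : (sp2 cs).1 ≠ [] ∧ (sp2 cs).1.head? ∈ [some '{', some '}', some '~', some '>'] :=
          (head_sp2_spec cs).mpr hs
        have he : escChars ('\n' :: cs) = '\n' :: escChars cs := by
          simp [escChars, hs]
        rw [he]
        simp only [sp2_cons_nl, List.append_nil]
        rw [mergeA_cons, if_pos hsp]
        have := ih []
        simp only [List.nil_append] at this
        rw [this]
      · have hsp : ¬ ((sp2 cs).1 ≠ [] ∧ (sp2 cs).1.head? ∈ [some '{', some '}', some '~', some '>']) :=
          fun hh => hs ((head_sp2_spec cs).mp hh)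
        have he : escChars ('\n' :: cs) = '\\' :: 'n' :: escChars cs := by
          simp [escChars, hs]
        rw [he]
        simp only [sp2_cons_nl, List.append_nil]
        rw [mergeA_cons, if_neg hsp]
        have := ih (pre ++ ['\\', 'n'])
        rw [List.append_assoc] at this
        simp only [List.cons_append, List.nil_append] at this
        rw [this]
        rw [sp2_cons_ne _ _ (by decide), sp2_cons_ne _ _ (by decide)]
        simp
    · have he : escChars (c :: cs) = c :: escChars cs := by
        simp [escChars, hc]
      rw [he]
      rw [sp2_cons_ne c cs hc, sp2_cons_ne c (escChars cs) hc]
      have := ih (pre ++ [c])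
      rw [List.append_assoc] at this
      simp only [List.cons_append, List.nil_append] at this
      rw [this]
      simp

theorem foldB_escChars (s : List Char) :
    ((s.zip ((s.drop 1).map some ++ [none])).foldl stepB []).flatten = escChars s := by
  have main : ∀ (s : List Char) (acc : List (List Char)),
      ((s.zip ((s.drop 1).map some ++ [none])).foldl stepB acc).flatten = acc.flatten ++ escChars s := by
    intro s
    induction s with
    | nil => intro acc; simp [escChars]
    | cons c cs ih =>
      intro acc
      cases cs with
      | nil =>
        by_cases h : (none : Option Char) ∈ [some '{', some '}', some '~', some '>']
        · simp at h
        · by_cases hc : c = '\n'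
          · subst hc; simp [stepB, escChars]
          · simp [stepB, escChars, hc]
      | cons d ds =>
        have hz : (c :: d :: ds).zip (((c :: d :: ds).drop 1).map some ++ [none]) =
            (c, some d) :: (d :: ds).zip (((d :: ds).drop 1).map some ++ [none]) := by
          simp [List.zip]
        rw [hz, List.foldl_cons, ih]
        by_cases hcd : c = '\n' ∧ ¬ (some d) ∈ [some '{', some '}', some '~', some '>']
        · rw [stepB, if_pos hcd]
          have he : escChars ('\n' :: d :: ds) = '\\' :: 'n' :: escChars (d :: ds) := by
            simp [escChars, hcd.2]
          rw [hcd.1, he]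
          simp
        · rw [stepB, if_neg hcd]
          have he : escChars (c :: d :: ds) = c :: escChars (d :: ds) := by
            simp only [escChars, List.head?_cons]
            rw [if_neg hcd]

          rw [he]
          simp
  have := main s []
  simpa using this

-- ===== VERDICT (by name: the statement is the Claim_ definition above) =====
theorem split_explanation_py_spec : Claim_equal_split_explanation_py := by
  intro e _
  unfold Spec_split_explanation_py split_explanation_py split_explanation_py_alt
  simp only [splitOn_single, foldB_escChars]
  have h1 : [((sp2 e.toList).1 :: (sp2 e.toList).2).headD []] = ([] : List (List Char)) ++ [(sp2 e.toList).1] := by simp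
  rw [h1]
  rw [PySem.List.slice_from _ (by decide)]
  simp only [Int.toNat_one, List.drop_one, List.tail_cons]
  rw [foldl_stepA]
  have h2 := mergeA_escChars e.toList []
  simp only [List.nil_append] at h2
  rw [h2, List.nil_append]
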